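-- pv_equiv track=rewrite | github.com/furlanut/lottery-lab | backend/lotto_predictor/analyzer/deep_lotto_sweep.py | ambetto_wins
-- ===== SOURCE A (Python) =====
-- def ambetto_wins(pick: tuple[int, int], drawn: list[int]) -> bool:
--     """Ambetto: vince se nei 5 estratti esistono (x, y) con |x-a|≤1 AND |y-b|≤1, x≠y."""
--     a, b = pick
--     has_a_zone = False
--     has_b_zone = False
--     a_number = None
--     b_number = None
--     for x in drawn:
--         if abs(x - a) <= 1:
--             has_a_zone = True
--             a_number = x
--         if abs(x - b) <= 1:
--             has_b_zone = True
--             b_number = x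
--     # vince se entrambe le zone hanno almeno un numero, e NON sono lo stesso numero
--     # (quando a e b sono adiacenti, una zona puo contenere un numero della zona opposta)
--     if not (has_a_zone and has_b_zone):
--         return False
--     # se a_number == b_number, dobbiamo verificare che ci sia un altro numero in una delle zone
--     if a_number == b_number:
--         # conta quanti numeri cadono in zone
--         hits = [x for x in drawn if abs(x - a) <= 1 or abs(x - b) <= 1]
--         return len(hits) >= 2
--     return True
-- ===== SOURCE B (Python) =====
-- def ambetto_wins(pick: tuple[int, int], drawn: list[int]) -> bool:
--     """Ambetto: both zones hit and at least two zone hits overall."""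
--     a, b = pick
--     in_a = any(abs(x - a) <= 1 for x in drawn)
--     in_b = any(abs(x - b) <= 1 for x in drawn)
--     cnt = sum(1 for x in drawn if abs(x - a) <= 1 or abs(x - b) <= 1)
--     return in_a and in_b and cnt >= 2
-- ===== Notes on version B (the rewrite author's own statement) =====
-- stated objective: simpler
-- what changed: Replaces A's stateful loop tracking the last hit in each zone plus a conditional second counting pass by three direct aggregates (zone-a hit, zone-b hit, union hit count) combined as in_a and in_b and cnt >= 2, which is equivalent because distinct last hits always force a count of at least 2.
import Mathlib
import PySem

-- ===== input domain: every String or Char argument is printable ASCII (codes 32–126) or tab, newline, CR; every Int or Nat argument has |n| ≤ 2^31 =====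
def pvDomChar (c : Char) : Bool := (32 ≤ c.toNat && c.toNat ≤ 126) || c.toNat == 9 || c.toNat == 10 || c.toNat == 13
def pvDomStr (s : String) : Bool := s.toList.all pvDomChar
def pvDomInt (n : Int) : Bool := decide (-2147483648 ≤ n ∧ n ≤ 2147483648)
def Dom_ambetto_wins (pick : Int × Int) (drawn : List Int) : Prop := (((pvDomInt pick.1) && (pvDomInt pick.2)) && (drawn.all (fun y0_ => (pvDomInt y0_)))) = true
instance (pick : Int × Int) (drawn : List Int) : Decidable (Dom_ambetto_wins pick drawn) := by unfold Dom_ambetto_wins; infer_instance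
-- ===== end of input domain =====

-- B replaces A's last-hit bookkeeping with three direct aggregates (simpler decomposition).


-- ===== PORT A =====
-- loop body: the two independent `if`s of A's for-loop, in order
def ambettoStep (a b : Int) (st : Bool × Bool × Option Int × Option Int) (x : Int) :
    Bool × Bool × Option Int × Option Int :=
  let st1 := if (x - a).natAbs ≤ 1 then (true, st.2.1, some x, st.2.2.2) else st
  if (x - b).natAbs ≤ 1 then (st1.1, true, st1.2.2.1, some x) else st1

def ambetto_wins (pick : Int × Int) (drawn : List Int) : Bool :=
  let a := pick.1
  let b := pick.2
  let st := drawn.foldl (ambettoStep a b) (false, false, none, none)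
  if !(st.1 && st.2.1) then false
  else if st.2.2.1 == st.2.2.2 then
    decide (2 ≤ (drawn.filter (fun x => decide ((x - a).natAbs ≤ 1) || decide ((x - b).natAbs ≤ 1))).length)
  else true

-- ===== PORT B =====
def ambetto_wins_alt (pick : Int × Int) (drawn : List Int) : Bool :=
  let a := pick.1
  let b := pick.2
  let inA := drawn.any (fun x => decide ((x - a).natAbs ≤ 1))
  let inB := drawn.any (fun x => decide ((x - b).natAbs ≤ 1))
  let cnt := drawn.countP (fun x => decide ((x - a).natAbs ≤ 1) || decide ((x - b).natAbs ≤ 1))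
  inA && inB && decide (2 ≤ cnt)

-- ===== PRECONDITION & SPEC =====
def Spec_ambetto_wins (pick : Int × Int) (drawn : List Int) (out : Bool) : Prop := out = ambetto_wins_alt pick drawn
instance (pick : Int × Int) (drawn : List Int) (out : Bool) : Decidable (Spec_ambetto_wins pick drawn out) := by unfold Spec_ambetto_wins; infer_instance

-- ===== CLAIM (what is proved, stated in full; the proofs are below) =====
def Claim_equal_ambetto_wins : Prop := ∀ (pick : Int × Int) (drawn : List Int), Dom_ambetto_wins pick drawn → Spec_ambetto_wins pick drawn (ambetto_wins pick drawn)

-- ===== LEMMAS AND PROOFS =====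

-- the 'last element satisfying p' accumulator, isolated per component
def lastHit (p : Int → Bool) (l : List Int) (acc : Option Int) : Option Int :=
  l.foldl (fun acc x => if p x then some x else acc) acc

theorem fold_eq (a b : Int) (l : List Int) (ha hb : Bool) (an bn : Option Int) :
    l.foldl (ambettoStep a b) (ha, hb, an, bn) =
      (ha || l.any (fun x => decide ((x - a).natAbs ≤ 1)),
       hb || l.any (fun x => decide ((x - b).natAbs ≤ 1)),
       lastHit (fun x => decide ((x - a).natAbs ≤ 1)) l an,
       lastHit (fun x => decide ((x - b).natAbs ≤ 1)) l bn) := by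
  induction l generalizing ha hb an bn with
  | nil => simp [lastHit]
  | cons x xs ih =>
    simp only [List.foldl_cons, List.any_cons, lastHit, ambettoStep]
    by_cases hA : (x - a).natAbs ≤ 1 <;> by_cases hB : (x - b).natAbs ≤ 1 <;>
      simp [hA, hB, ih, lastHit]

theorem lastHit_some (p : Int → Bool) (l : List Int) (an : Option Int) (y : Int)
    (h : lastHit p l an = some y) : an = some y ∨ (y ∈ l ∧ p y = true) := by
  induction l generalizing an with
  | nil => simp [lastHit] at h; left; simpa using h
  | cons x xs ih =>
    simp only [lastHit, List.foldl_cons] at h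
    by_cases hp : p x = true
    · rcases ih _ (by simpa [hp] using h) with h' | h'
      · right; simp at h'; subst h'; simp [hp]
      · right; exact ⟨List.mem_cons_of_mem _ h'.1, h'.2⟩
    · rcases ih _ (by simpa [hp] using h) with h' | h'
      · left; exact h'
      · right; exact ⟨List.mem_cons_of_mem _ h'.1, h'.2⟩

theorem lastHit_noHit (p : Int → Bool) (l : List Int) (acc : Option Int)
    (h : l.any p = false) : lastHit p l acc = acc := by
  induction l generalizing acc with
  | nil => simp [lastHit]
  | cons z zs ihz =>
    simp only [List.any_cons, Bool.or_eq_false_iff] at h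
    show lastHit p zs (if p z = true then some z else acc) = acc
    rw [if_neg (by rw [h.1]; exact Bool.false_ne_true)]
    exact ihz _ h.2

theorem lastHit_isSome (p : Int → Bool) (l : List Int) (an : Option Int)
    (h : l.any p = true) : (lastHit p l an).isSome := by
  induction l generalizing an with
  | nil => simp at h
  | cons x xs ih =>
    show (lastHit p xs (if p x = true then some x else an)).isSome = true
    by_cases hp : p x = true
    · by_cases hxs : xs.any p = true
      · exact ih _ hxs
      · rw [if_pos hp, lastHit_noHit p xs (some x) (by simpa using hxs)]; rfl
    · simp only [List.any_cons, Bool.or_eq_true] at h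
      rcases h with h | h
      · exact absurd h hp
      · rw [if_neg hp]; exact ih _ h

theorem two_mem_length {l : List Int} {x y : Int} (hx : x ∈ l) (hy : y ∈ l) (hne : x ≠ y) :
    2 ≤ l.length := by
  obtain ⟨s, t, rfl⟩ := List.append_of_mem hx
  have : y ∈ s ∨ y ∈ t := by
    rcases List.mem_append.mp hy with h | h
    · exact Or.inl h
    · rcases List.mem_cons.mp h with h | h
      · exact absurd h.symm hne
      · exact Or.inr h
  rcases this with h | h <;>
    · have := List.length_pos_of_mem h
      simp [List.length_append]; omega

-- ===== VERDICT (by name: the statement is the Claim_ definition above) =====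
theorem ambetto_wins_spec : Claim_equal_ambetto_wins := by
  intro pick drawn _
  unfold Spec_ambetto_wins ambetto_wins ambetto_wins_alt
  obtain ⟨a, b⟩ := pick
  simp only [fold_eq, Bool.false_or]
  set pA : Int → Bool := fun x => decide ((x - a).natAbs ≤ 1) with hpA
  set pB : Int → Bool := fun x => decide ((x - b).natAbs ≤ 1) with hpB
  set pU : Int → Bool := fun x => pA x || pB x with hpU
  by_cases hA : drawn.any pA = true
  · by_cases hB : drawn.any pB = true
    · have hsa := lastHit_isSome pA drawn none hA
      have hsb := lastHit_isSome pB drawn none hB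
      obtain ⟨xa, hxa⟩ := Option.isSome_iff_exists.mp hsa
      obtain ⟨xb, hxb⟩ := Option.isSome_iff_exists.mp hsb
      have hma := (lastHit_some pA drawn none xa hxa).resolve_left (by simp)
      have hmb := (lastHit_some pB drawn none xb hxb).resolve_left (by simp)
      have hcnt : drawn.countP pU = (drawn.filter pU).length :=
        (List.countP_eq_length_filter ..)
      by_cases hEq : xa = xb
      · subst hEq
        simp [hA, hB, hxa, hxb, hcnt]
      · have h2 : 2 ≤ (drawn.filter pU).length := by
          apply two_mem_length (x := xa) (y := xb) _ _ hEq
          · exact List.mem_filter.mpr ⟨hma.1, by simp [hpU, hma.2]⟩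
          · exact List.mem_filter.mpr ⟨hmb.1, by simp [hpU, hmb.2]⟩
        simp [hA, hB, hxa, hxb, hEq, hcnt, h2]
    · simp [hA, hB]
  · simp [hA]
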